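-- pv_equiv track=rewrite | github.com/zepor/Automate-YT-Shorts-Video-Resource- | Backend/highlight_detection.py | find_highlights
-- ===== SOURCE A (Python) =====
-- from typing import List, Dict
--
-- def find_highlights(chat_spikes: List[int], audio_peaks: List[int], window: int = 10) -> List[Dict]:
--     """Find highlight timestamps where chat and audio spikes overlap within a window (seconds)."""
--     highlights = []
--     for chat_time in chat_spikes:
--         for audio_time in audio_peaks:
--             if abs(chat_time - audio_time) <= window:
--                 highlights.append({'timestamp': chat_time})
--                 break
--     return highlights
-- ===== SOURCE B (Python) =====
-- from typing import List, Dict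
--
-- def find_highlights(chat_spikes: List[int], audio_peaks: List[int], window: int = 10) -> List[Dict]:
--     """Sort the audio peaks once, then binary-search each chat spike for a peak
--     within the window: O((n+m) log m) instead of A's O(n*m)."""
--     peaks = sorted(audio_peaks)
--     n = len(peaks)
--     highlights = []
--     for chat_time in chat_spikes:
--         # bisect_left(peaks, chat_time - window), hand-written (A imports no bisect)
--         lo, hi = 0, n
--         target = chat_time - window
--         while lo < hi:
--             mid = (lo + hi) // 2
--             if peaks[mid] < target:
--                 lo = mid + 1
--             else:
--                 hi = mid
--         if lo < n and peaks[lo] <= chat_time + window: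
--             highlights.append({'timestamp': chat_time})
--     return highlights
-- ===== Notes on version B (the rewrite author's own statement) =====
-- stated objective: faster
-- what changed: B sorts audio_peaks once and binary-searches each chat spike for the first peak >= chat_time - window instead of A's linear inner scan over audio_peaks.
import Mathlib
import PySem

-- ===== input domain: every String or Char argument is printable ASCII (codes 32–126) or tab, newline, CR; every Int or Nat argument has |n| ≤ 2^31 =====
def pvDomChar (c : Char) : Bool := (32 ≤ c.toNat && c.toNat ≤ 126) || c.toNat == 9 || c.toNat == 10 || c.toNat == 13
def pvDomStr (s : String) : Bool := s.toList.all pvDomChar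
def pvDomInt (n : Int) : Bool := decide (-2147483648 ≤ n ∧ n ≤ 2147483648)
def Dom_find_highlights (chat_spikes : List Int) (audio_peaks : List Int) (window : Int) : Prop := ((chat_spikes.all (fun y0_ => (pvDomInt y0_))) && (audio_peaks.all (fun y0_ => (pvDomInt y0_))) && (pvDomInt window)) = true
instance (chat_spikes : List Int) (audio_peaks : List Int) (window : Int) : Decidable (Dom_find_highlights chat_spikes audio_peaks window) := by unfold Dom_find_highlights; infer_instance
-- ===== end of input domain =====

-- B replaces A's O(n*m) inner linear scan by sorting audio_peaks once and binary-searching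
-- each chat spike (objective: faster, O((n+m) log m)).

-- ===== PORT A =====
-- inner 'for audio_time in audio_peaks: if abs(...) <= window: append; break' —
-- its only effect is one append, so it is the scan returning whether a peak is in range
def pvHasPeak (chat_time : Int) (window : Int) : List Int → Bool
  | [] => false
  | audio_time :: rest =>
      if |chat_time - audio_time| ≤ window then true else pvHasPeak chat_time window rest

def find_highlights (chat_spikes : List Int) (audio_peaks : List Int) (window : Int) : List (List (String × Int)) :=
  chat_spikes.foldl
    (fun highlights chat_time =>
      if pvHasPeak chat_time window audio_peaks then highlights ++ [[("timestamp", chat_time)]]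
      else highlights)
    []

-- ===== PORT B =====
-- Source B's hand-written lo/hi loop is exactly bisect_left, i.e. PySem.List.bisectLeft
def find_highlights_alt (chat_spikes : List Int) (audio_peaks : List Int) (window : Int) : List (List (String × Int)) :=
  let peaks := PySem.List.sorted audio_peaks (fun x => x) false
  let n := peaks.length
  chat_spikes.foldl
    (fun highlights chat_time =>
      let lo := PySem.List.bisectLeft peaks (chat_time - window)
      if lo < n ∧ peaks.getD lo 0 ≤ chat_time + window then highlights ++ [[("timestamp", chat_time)]]
      else highlights)
    []

-- ===== PRECONDITION & SPEC =====
def Spec_find_highlights (chat_spikes : List Int) (audio_peaks : List Int) (window : Int) (out : List (List (String × Int))) : Prop := out = find_highlights_alt chat_spikes audio_peaks window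
instance (chat_spikes : List Int) (audio_peaks : List Int) (window : Int) (out : List (List (String × Int))) : Decidable (Spec_find_highlights chat_spikes audio_peaks window out) := by unfold Spec_find_highlights; infer_instance

-- ===== CLAIM (what is proved, stated in full; the proofs are below) =====
def Claim_equal_find_highlights : Prop := ∀ (chat_spikes : List Int) (audio_peaks : List Int) (window : Int), Dom_find_highlights chat_spikes audio_peaks window → Spec_find_highlights chat_spikes audio_peaks window (find_highlights chat_spikes audio_peaks window)

-- ===== LEMMAS AND PROOFS =====

theorem pvHasPeak_iff (c w : Int) (aps : List Int) :
    pvHasPeak c w aps = true ↔ ∃ a ∈ aps, |c - a| ≤ w := by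
  induction aps with
  | nil => simp [pvHasPeak]
  | cons a rest ih =>
      simp only [pvHasPeak, List.mem_cons]
      split_ifs with h
      · simp [h]
      · rw [ih]
        constructor
        · rintro ⟨x, hx, hxl⟩; exact ⟨x, Or.inr hx, hxl⟩
        · rintro ⟨x, hx | hx, hxl⟩
          · exact absurd (hx ▸ hxl) h
          · exact ⟨x, hx, hxl⟩

theorem pvBCond_iff (c w : Int) (aps : List Int) :
    (PySem.List.bisectLeft (PySem.List.sorted aps (fun x => x) false) (c - w) <
        (PySem.List.sorted aps (fun x => x) false).length ∧
      (PySem.List.sorted aps (fun x => x) false).getD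
        (PySem.List.bisectLeft (PySem.List.sorted aps (fun x => x) false) (c - w)) 0 ≤ c + w)
    ↔ ∃ a ∈ aps, |c - a| ≤ w := by
  set s := PySem.List.sorted aps (fun x => x) false with hs
  have hpw : s.Pairwise (· ≤ ·) := PySem.List.sorted_pairwise aps (fun x => x)
  obtain ⟨h1, h2, h3⟩ := PySem.List.bisectLeft_spec s (c - w) hpw
  set lo := PySem.List.bisectLeft s (c - w) with hlo
  constructor
  · rintro ⟨hlt, hle⟩
    refine ⟨s[lo], ?_, ?_⟩
    · exact (PySem.List.mem_sorted aps (fun x => x) false s[lo]).mp (List.getElem_mem hlt)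
    · have hge := h3 lo hlt le_rfl
      rw [List.getD_eq_getElem s 0 hlt] at hle
      rw [abs_le]; omega
  · rintro ⟨a, ha, habs⟩
    have has : a ∈ s := (PySem.List.mem_sorted aps (fun x => x) false a).mpr ha
    obtain ⟨j, hj, rfl⟩ := List.getElem_of_mem has
    have hb := abs_le.mp habs
    have hloj : lo ≤ j := by
      by_contra hc
      have := h2 j hj (by omega)
      omega
    have hlt : lo < s.length := lt_of_le_of_lt hloj hj
    have hmono : s[lo] ≤ s[j] := by
      have := PySem.List.sorted_id_getElem_mono aps hloj (hs ▸ hj)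
      simpa [← hs] using this
    refine ⟨hlt, ?_⟩
    rw [List.getD_eq_getElem s 0 hlt]
    omega

theorem pvFold_eq (aps : List Int) (w : Int) (cs : List Int)
    (acc : List (List (String × Int))) :
    cs.foldl
      (fun highlights chat_time =>
        if pvHasPeak chat_time w aps then highlights ++ [[("timestamp", chat_time)]]
        else highlights) acc =
    cs.foldl
      (fun highlights chat_time =>
        if PySem.List.bisectLeft (PySem.List.sorted aps (fun x => x) false) (chat_time - w) <
              (PySem.List.sorted aps (fun x => x) false).length ∧
            (PySem.List.sorted aps (fun x => x) false).getD
              (PySem.List.bisectLeft (PySem.List.sorted aps (fun x => x) false) (chat_time - w)) 0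
              ≤ chat_time + w then highlights ++ [[("timestamp", chat_time)]]
        else highlights) acc := by
  induction cs generalizing acc with
  | nil => rfl
  | cons c rest ih =>
      simp only [List.foldl_cons]
      rw [if_congr (Iff.trans ⟨fun h => h, fun h => h⟩ ((pvHasPeak_iff c w aps).trans (pvBCond_iff c w aps).symm)) rfl rfl]
      exact ih _

-- ===== VERDICT (by name: the statement is the Claim_ definition above) =====
theorem find_highlights_spec : Claim_equal_find_highlights := by
  intro cs aps w _
  unfold Spec_find_highlights find_highlights find_highlights_alt
  exact pvFold_eq aps w cs []
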